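-- pv_equiv track=rewrite | github.com/UsernameCodeRookie/ndp-sim | config/component_config/se_wr_mse.py | _compute_field_offsets
-- ===== SOURCE A (Python) =====
-- def _compute_total_len(specs):
--     return sum(e * n for _, e, n in specs)
--
-- def _compute_field_offsets(specs):
--     """返回每个字段在拼接后 [hi:lo] 的bit范围（高位在前）。"""
--     total = _compute_total_len(specs)
--     offsets = {}
--     hi = total - 1
--     for name, e, n in specs:
--         width = e * n
--         lo = hi - width + 1
--         offsets[name] = (hi, lo)  # [hi:lo]
--         hi = lo - 1
--     return offsets
-- ===== SOURCE B (Python) =====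
-- def _compute_field_offsets(specs):
--     """返回每个字段在拼接后 [hi:lo] 的bit范围（高位在前）。"""
--     lo = 0
--     items = []
--     for name, e, n in reversed(specs):
--         width = e * n
--         hi = lo + width - 1
--         items.append((name, (hi, lo)))
--         lo = hi + 1
--     return dict(reversed(items))
-- ===== Notes on version B (the rewrite author's own statement) =====
-- stated objective: simpler
-- what changed: B drops the total-length precompute and the downward hi chain: it walks the specs in reverse accumulating lo from 0 upward, collects (name,(hi,lo)) pairs, and builds the dict from the reversed pair list, which reproduces A's dict exactly (including insertion order and duplicate-key overwrites).
import Mathlib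
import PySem

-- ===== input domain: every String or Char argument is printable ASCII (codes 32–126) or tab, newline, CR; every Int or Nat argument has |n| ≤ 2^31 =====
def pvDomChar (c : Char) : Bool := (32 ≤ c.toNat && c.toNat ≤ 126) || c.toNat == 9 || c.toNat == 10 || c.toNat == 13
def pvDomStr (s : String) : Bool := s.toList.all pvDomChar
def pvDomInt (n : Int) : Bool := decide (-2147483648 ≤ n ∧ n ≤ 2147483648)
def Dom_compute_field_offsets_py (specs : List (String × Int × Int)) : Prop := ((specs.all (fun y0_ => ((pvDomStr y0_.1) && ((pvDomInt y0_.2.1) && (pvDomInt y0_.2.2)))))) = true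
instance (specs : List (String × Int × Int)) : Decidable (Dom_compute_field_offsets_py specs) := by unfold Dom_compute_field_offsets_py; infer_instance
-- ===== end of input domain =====

-- ===== PORT A =====
-- B builds the same [hi:lo] ranges from the least-significant end upward (no total-length precompute); objective: simpler.
-- _compute_total_len: sum(e * n for _, e, n in specs)
def pvTotalLen (specs : List (String × Int × Int)) : Int :=
  specs.foldl (fun acc t => acc + t.2.1 * t.2.2) 0

def compute_field_offsets_py (specs : List (String × Int × Int)) : List (String × Int × Int) :=
  let total := pvTotalLen specs
  let st := specs.foldl
    (fun (st : PySem.Dict String (Int × Int) × Int) t =>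
      let width := t.2.1 * t.2.2
      let lo := st.2 - width + 1
      (st.1.insert t.1 (st.2, lo), lo - 1))
    (PySem.Dict.empty, total - 1)
  st.1.items

-- ===== PORT B =====
def compute_field_offsets_py_alt (specs : List (String × Int × Int)) : List (String × Int × Int) :=
  let st := specs.reverse.foldl
    (fun (st : List (String × Int × Int) × Int) t =>
      let width := t.2.1 * t.2.2
      let hi := st.2 + width - 1
      (st.1 ++ [(t.1, (hi, st.2))], hi + 1))
    ([], 0)
  (PySem.Dict.ofList st.1.reverse).items

-- ===== PRECONDITION & SPEC =====
def Spec_compute_field_offsets_py (specs : List (String × Int × Int)) (out : List (String × Int × Int)) : Prop := out = compute_field_offsets_py_alt specs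
instance (specs : List (String × Int × Int)) (out : List (String × Int × Int)) : Decidable (Spec_compute_field_offsets_py specs out) := by unfold Spec_compute_field_offsets_py; infer_instance

-- ===== CLAIM (what is proved, stated in full; the proofs are below) =====
def Claim_equal_compute_field_offsets_py : Prop := ∀ (specs : List (String × Int × Int)), Dom_compute_field_offsets_py specs → Spec_compute_field_offsets_py specs (compute_field_offsets_py specs)

-- ===== LEMMAS AND PROOFS =====

-- the forward list of (name, (hi, lo)) pairs starting from a given hi
def pvF : List (String × Int × Int) → Int → List (String × Int × Int)
  | [], _ => []
  | t :: rest, hi => (t.1, (hi, hi - t.2.1 * t.2.2 + 1)) :: pvF rest (hi - t.2.1 * t.2.2)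

-- sum of widths, by structural recursion
def pvS : List (String × Int × Int) → Int
  | [] => 0
  | t :: rest => t.2.1 * t.2.2 + pvS rest

theorem pvTotalLen_eq (specs : List (String × Int × Int)) (a : Int) :
    specs.foldl (fun acc t => acc + t.2.1 * t.2.2) a = a + pvS specs := by
  induction specs generalizing a with
  | nil => simp [pvS]
  | cons x rest ih => simp [List.foldl, pvS, ih]; ring

theorem pvFoldA (specs : List (String × Int × Int))
    (d : PySem.Dict String (Int × Int)) (hi : Int) :
    specs.foldl
      (fun (st : PySem.Dict String (Int × Int) × Int) t =>
        let width := t.2.1 * t.2.2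
        let lo := st.2 - width + 1
        (st.1.insert t.1 (st.2, lo), lo - 1)) (d, hi)
      = ((pvF specs hi).foldl (fun d p => d.insert p.1 p.2) d, hi - pvS specs) := by
  induction specs generalizing d hi with
  | nil => simp [pvF, pvS]
  | cons x rest ih =>
      have e : hi - x.2.1 * x.2.2 + 1 - 1 = hi - x.2.1 * x.2.2 := by ring
      simp only [List.foldl, e, ih, pvF, pvS, Prod.mk.injEq]
      exact ⟨trivial, by ring⟩

theorem pvFoldB (specs : List (String × Int × Int))
    (acc : List (String × Int × Int)) (lo : Int) :
    specs.reverse.foldl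
      (fun (st : List (String × Int × Int) × Int) t =>
        let width := t.2.1 * t.2.2
        let hi := st.2 + width - 1
        (st.1 ++ [(t.1, (hi, st.2))], hi + 1)) (acc, lo)
      = (acc ++ (pvF specs (lo + pvS specs - 1)).reverse, lo + pvS specs) := by
  induction specs generalizing acc lo with
  | nil => simp [pvF, pvS]
  | cons x rest ih =>
      have h2 : lo + (x.2.1 * x.2.2 + pvS rest) - 1 - x.2.1 * x.2.2 = lo + pvS rest - 1 := by ring
      have h1 : lo + (x.2.1 * x.2.2 + pvS rest) - 1 = lo + pvS rest + x.2.1 * x.2.2 - 1 := by ring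
      simp only [List.reverse_cons, List.foldl_append, ih, List.foldl, pvF, pvS,
        List.append_assoc, Prod.mk.injEq]
      refine ⟨?_, by ring⟩
      rw [h2, show lo + pvS rest - 1 + 1 = lo + pvS rest from by ring, h1]

-- ===== VERDICT (by name: the statement is the Claim_ definition above) =====
theorem compute_field_offsets_py_spec : Claim_equal_compute_field_offsets_py := by
  intro specs _
  unfold Spec_compute_field_offsets_py
  simp only [compute_field_offsets_py, compute_field_offsets_py_alt]
  rw [pvFoldA, pvFoldB]
  simp only [List.nil_append, List.reverse_reverse, zero_add]
  have hofList : ∀ (l : List (String × Int × Int)),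
      PySem.Dict.ofList l = l.foldl (fun d p => d.insert p.1 p.2) PySem.Dict.empty := fun _ => rfl
  rw [hofList]
  have : pvTotalLen specs = pvS specs := by
    unfold pvTotalLen; rw [pvTotalLen_eq]; ring
  rw [this]
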